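-- pv_equiv track=rewrite | github.com/dhurian/teamIQ | services/project_service.py | delete_project
-- ===== SOURCE A (Python) =====
-- def delete_project(projects: list, pid: str, active_id: str) -> tuple[list, str]:
--     """
--     Remove project *pid* from *projects*.
--     Returns (new_projects_list, new_active_id).
--     Raises ValueError if pid not found or only one project remains.
--     """
--     if not any(p["id"] == pid for p in projects):
--         raise KeyError(f"Project {pid} not found")
--     if len(projects) <= 1:
--         raise ValueError("Must keep at least one project")
--     new_list = [p for p in projects if p["id"] != pid]
--     new_active = active_id if active_id != pid else new_list[0]["id"]
--     return new_list, new_active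
-- ===== SOURCE B (Python) =====
-- def delete_project(projects: list, pid: str, active_id: str) -> tuple[list, str]:
--     """Recursive decomposition: one structural recursion returns (removed_count, kept_list),
--     building the kept list back-to-front on the way out of the recursion; no any()/filter passes."""
--     def go(rest):
--         if not rest:
--             return 0, []
--         removed, kept = go(rest[1:])
--         if rest[0]["id"] == pid:
--             return removed + 1, kept
--         return removed, [rest[0]] + kept
--     removed, new_list = go(projects)
--     if removed == 0:
--         raise KeyError(f"Project {pid} not found")
--     if len(projects) <= 1:
--         raise ValueError("Must keep at least one project")
--     new_active = active_id if active_id != pid else new_list[0]["id"]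
--     return new_list, new_active
-- ===== Notes on version B (the rewrite author's own statement) =====
-- stated objective: alternative
-- what changed: B replaces A's staged any()-scan plus list-comprehension filter with a single structural recursion that returns (removed_count, kept_list), building the kept list on the way out of the recursion; existence is detected by the removal count instead of a membership scan, with the same exception order.
import Mathlib
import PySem

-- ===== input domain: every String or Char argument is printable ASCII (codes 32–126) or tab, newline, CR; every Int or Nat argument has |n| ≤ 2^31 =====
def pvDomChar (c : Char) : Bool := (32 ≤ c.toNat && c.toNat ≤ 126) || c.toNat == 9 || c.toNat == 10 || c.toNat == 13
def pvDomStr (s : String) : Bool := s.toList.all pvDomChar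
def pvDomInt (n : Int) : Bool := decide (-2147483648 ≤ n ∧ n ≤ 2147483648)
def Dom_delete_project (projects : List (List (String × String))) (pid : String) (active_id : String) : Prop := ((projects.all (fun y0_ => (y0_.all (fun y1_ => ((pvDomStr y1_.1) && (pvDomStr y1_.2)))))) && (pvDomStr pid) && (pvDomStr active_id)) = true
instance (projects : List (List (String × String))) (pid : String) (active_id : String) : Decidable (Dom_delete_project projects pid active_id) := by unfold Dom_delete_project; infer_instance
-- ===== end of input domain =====

-- B replaces A's staged any()-scan + filter comprehension with one structural recursion returning (removed_count, kept_list); return values agree on all inputs where A returns (objective: alternative decomposition).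


-- p["id"]: first-match lookup in the association list; Pre_ guarantees the key is present, the "" default is never reached inside Pre_
def pvId (p : List (String × String)) : String := (p.lookup "id").getD ""

-- ===== PORT A =====
def delete_project (projects : List (List (String × String))) (pid : String) (active_id : String) : (List (List (String × String))) × String :=
  if !(projects.any (fun p => pvId p == pid)) then ([], "")   -- Python: raise KeyError (outside Pre_)
  else if projects.length ≤ 1 then ([], "")                   -- Python: raise ValueError (outside Pre_)
  else
    let new_list := projects.filter (fun p => !(pvId p == pid))
    let new_active := if active_id != pid then active_id else pvId (new_list.headD [])  -- headD: new_list ≠ [] inside Pre_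
    (new_list, new_active)

-- ===== PORT B =====
-- B's recursive helper 'go': returns (removed_count, kept_list), kept list built on the way out
def pvGo (pid : String) : List (List (String × String)) → Int × List (List (String × String))
  | [] => (0, [])
  | p :: rest =>
    let s := pvGo pid rest
    if pvId p == pid then (s.1 + 1, s.2) else (s.1, p :: s.2)

def delete_project_alt (projects : List (List (String × String))) (pid : String) (active_id : String) : (List (List (String × String))) × String :=
  let s := pvGo pid projects
  if s.1 == 0 then ([], "")                                   -- Python: raise KeyError (outside Pre_)
  else if projects.length ≤ 1 then ([], "")                   -- Python: raise ValueError (outside Pre_)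
  else
    (s.2, if active_id != pid then active_id else pvId (s.2.headD []))

-- ===== PRECONDITION & SPEC =====
-- Pre_ excludes exactly the inputs where the Python A raises: a project dict without an "id" key (KeyError),
-- pid not among the ids (KeyError), fewer than two projects (ValueError), and active_id = pid with every
-- project's id equal to pid (IndexError on new_list[0]).
def Pre_delete_project (projects : List (List (String × String))) (pid : String) (active_id : String) : Prop :=
  (∀ p ∈ projects, (p.lookup "id").isSome) ∧
  projects.any (fun p => pvId p == pid) = true ∧
  2 ≤ projects.length ∧
  (active_id = pid → projects.any (fun p => !(pvId p == pid)) = true)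
instance (projects : List (List (String × String))) (pid : String) (active_id : String) : Decidable (Pre_delete_project projects pid active_id) := by unfold Pre_delete_project; infer_instance

def pvWitness_delete_project : (List (List (String × String))) × String × String :=
  ([[("id", "a"), ("name", "Alpha")], [("id", "b"), ("name", "Beta")]], "a", "a")

def Spec_delete_project (projects : List (List (String × String))) (pid : String) (active_id : String) (out : (List (List (String × String))) × String) : Prop := out = delete_project_alt projects pid active_id
instance (projects : List (List (String × String))) (pid : String) (active_id : String) (out : (List (List (String × String))) × String) : Decidable (Spec_delete_project projects pid active_id out) := by unfold Spec_delete_project; infer_instance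

-- ===== CLAIM =====
def Claim_equal_delete_project : Prop := ∀ (projects : List (List (String × String))) (pid : String) (active_id : String), Dom_delete_project projects pid active_id → Pre_delete_project projects pid active_id → Spec_delete_project projects pid active_id (delete_project projects pid active_id)

-- ===== LEMMAS AND PROOFS =====

-- B's recursion computes the count of removed elements and A's filtered list
theorem pvGo_char (pid : String) (l : List (List (String × String))) :
    pvGo pid l = (((l.filter (fun p => pvId p == pid)).length : Int),
                  l.filter (fun p => !(pvId p == pid))) := by
  induction l with
  | nil => simp [pvGo]
  | cons p t ih =>
    by_cases h : pvId p == pid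
    · simp [pvGo, ih, h]
    · have h' : (pvId p == pid) = false := by simpa using h
      simp [pvGo, ih, h']

theorem delete_project_spec : Claim_equal_delete_project := by
  intro projects pid active_id _ hPre
  obtain ⟨_, hAny, hlen, _⟩ := hPre
  have hne : projects.filter (fun p => pvId p == pid) ≠ [] := by
    obtain ⟨p, hp, hm⟩ := List.any_eq_true.mp hAny
    intro he
    have : p ∈ projects.filter (fun p => pvId p == pid) := List.mem_filter.mpr ⟨hp, hm⟩
    rw [he] at this; exact absurd this (List.not_mem_nil)
  have hpos := List.length_pos_iff.mpr hne
  have hc : ((((projects.filter (fun p => pvId p == pid)).length : Int)) == 0) = false := by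
    rw [beq_eq_false_iff_ne]
    intro h
    omega
  have hgt : ¬ projects.length ≤ 1 := by omega
  unfold Spec_delete_project delete_project delete_project_alt
  simp only [pvGo_char]
  simp [hAny, hc, hgt]
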